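-- pv_equiv track=rewrite | github.com/shihwesley/SamPlaysBaseball | benchmarks/bench_fps.py | build_variable_indices
-- ===== SOURCE A (Python) =====
-- def build_variable_indices(n_total: int) -> tuple[set[int], list[int]]:
--     """
--     Compute which 60fps frame indices to keep for variable-rate strategy.
--
--     30fps outside the release window, 60fps inside it.
--     Returns (keep_set, ordered_list).
--     """
--     release_start = int(n_total * 0.55)
--     release_end = int(n_total * 0.80)
--
--     indices = []
--     for i in range(n_total):
--         if release_start <= i < release_end:
--             indices.append(i)
--         elif i % 2 == 0:
--             indices.append(i)
--
--     return set(indices), indices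
-- ===== SOURCE B (Python) =====
-- def build_variable_indices(n_total: int) -> tuple[set[int], list[int]]:
--     """Same result built from three range segments instead of a per-index scan."""
--     release_start = int(n_total * 0.55)
--     release_end = int(n_total * 0.80)
--     head = list(range(0, release_start, 2))
--     window = list(range(release_start, release_end))
--     tail_start = release_end + release_end % 2
--     tail = list(range(tail_start, n_total, 2))
--     indices = head + window + tail
--     return set(indices), indices
-- ===== Notes on version B (the rewrite author's own statement) =====
-- stated objective: alternative
-- what changed: B builds the ordered list by concatenating three arithmetic ranges (step-2 evens below the release window, the full window, step-2 evens from the first even index at or after the window's end) instead of scanning every index and testing the window/parity condition on each.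
import Mathlib
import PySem

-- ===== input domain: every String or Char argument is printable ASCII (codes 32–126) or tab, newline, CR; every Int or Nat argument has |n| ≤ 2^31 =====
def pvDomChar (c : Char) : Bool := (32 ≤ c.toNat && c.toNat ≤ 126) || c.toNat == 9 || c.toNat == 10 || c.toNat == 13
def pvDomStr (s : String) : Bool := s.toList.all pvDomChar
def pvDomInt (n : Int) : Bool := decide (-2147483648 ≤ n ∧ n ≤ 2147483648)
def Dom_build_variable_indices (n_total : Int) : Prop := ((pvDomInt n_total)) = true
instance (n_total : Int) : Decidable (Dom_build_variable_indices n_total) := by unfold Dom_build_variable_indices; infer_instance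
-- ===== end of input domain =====

-- B builds the result by concatenating three arithmetic ranges (evens below the window,
-- the whole window, evens from the window's end) instead of testing every index; alternative decomposition, same cost class.

-- ===== PORT A =====
-- Shared float helper: exact integer model of CPython's `int(n * c)` where c is the IEEE-754
-- double with mantissa numerator m over 2^53 (0.55 = 4953959590107546/2^53, 0.80 = 7205759403792794/2^53):
-- the exact product |n|*m/2^53 is rounded to 53 significant bits (nearest, ties to even) and truncated
-- toward zero.  Exact for |n| ≤ 2^31 (no overflow/subnormals there); used verbatim by both ports.
def pvRoundMant (x : Nat) : Nat :=
  let s := Nat.log2 x + 1 - 53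
  let q := x / 2 ^ s
  let r := x % 2 ^ s
  let q' := if 2 * r > 2 ^ s ∨ (2 * r = 2 ^ s ∧ q % 2 = 1) then q + 1 else q
  q' * 2 ^ s

def pvTruncMul (n : Int) (m : Nat) : Int :=
  (if n < 0 then (-1 : Int) else 1) * ((pvRoundMant (n.natAbs * m)) / 2 ^ 53 : Nat)

def build_variable_indices (n_total : Int) : List Int × List Int :=
  let release_start := pvTruncMul n_total 4953959590107546   -- int(n_total * 0.55)
  let release_end := pvTruncMul n_total 7205759403792794     -- int(n_total * 0.80)
  let indices := (PySem.List.pyRange 0 n_total 1).foldl (fun acc i =>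
      if release_start ≤ i ∧ i < release_end then acc ++ [i]
      else if PySem.Int.mod i 2 = 0 then acc ++ [i]
      else acc) []
  (PySem.Set.ofList indices, indices)

-- ===== PORT B =====
def build_variable_indices_alt (n_total : Int) : List Int × List Int :=
  let release_start := pvTruncMul n_total 4953959590107546   -- int(n_total * 0.55)
  let release_end := pvTruncMul n_total 7205759403792794     -- int(n_total * 0.80)
  let head := PySem.List.pyRange 0 release_start 2
  let window := PySem.List.pyRange release_start release_end 1
  let tail_start := release_end + PySem.Int.mod release_end 2
  let tail := PySem.List.pyRange tail_start n_total 2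
  let indices := head ++ window ++ tail
  (PySem.Set.ofList indices, indices)

-- ===== PRECONDITION & SPEC =====
def Spec_build_variable_indices (n_total : Int) (out : List Int × List Int) : Prop := out = build_variable_indices_alt n_total
instance (n_total : Int) (out : List Int × List Int) : Decidable (Spec_build_variable_indices n_total out) := by unfold Spec_build_variable_indices; infer_instance

-- ===== CLAIM (what is proved, stated in full; the proofs are below) =====
def Claim_equal_build_variable_indices : Prop := ∀ (n_total : Int), Dom_build_variable_indices n_total → Spec_build_variable_indices n_total (build_variable_indices n_total)

-- ===== LEMMAS AND PROOFS =====

-- `pvRoundMant x` is within one ulp of x, and the ulp is ≤ max(1, x/2^52): both directions, scaled by 2^52.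
theorem pvRoundMant_bounds (x : Nat) :
    pvRoundMant x * 2 ^ 52 ≤ x * 2 ^ 52 + x + 2 ^ 52 ∧
    x * 2 ^ 52 ≤ pvRoundMant x * 2 ^ 52 + x + 2 ^ 52 := by
  unfold pvRoundMant
  set s := Nat.log2 x + 1 - 53 with hs
  have hqr : 2 ^ s * (x / 2 ^ s) + x % 2 ^ s = x := Nat.div_add_mod x (2 ^ s)
  have hr : x % 2 ^ s < 2 ^ s := Nat.mod_lt _ (by positivity)
  have hE : 2 ^ s = 1 ∨ 2 ^ s * 2 ^ 52 ≤ x := by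
    rcases Nat.eq_zero_or_pos s with h0 | hpos
    · left; simp [h0]
    · right
      have hx0 : x ≠ 0 := by
        intro h; rw [h] at hs; simp [Nat.log2] at hs; omega
      have hlog : s + 52 = Nat.log2 x := by
        have : 53 ≤ Nat.log2 x + 1 := by omega
        omega
      calc 2 ^ s * 2 ^ 52 = 2 ^ (s + 52) := by rw [pow_add]
        _ = 2 ^ Nat.log2 x := by rw [hlog]
        _ ≤ x := Nat.log2_self_le hx0
  set q := x / 2 ^ s
  set r := x % 2 ^ s
  have hub : (if 2 * r > 2 ^ s ∨ (2 * r = 2 ^ s ∧ q % 2 = 1) then q + 1 else q) * 2 ^ s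
      = q * 2 ^ s ∨
      (if 2 * r > 2 ^ s ∨ (2 * r = 2 ^ s ∧ q % 2 = 1) then q + 1 else q) * 2 ^ s
      = q * 2 ^ s + 2 ^ s := by
    split_ifs <;> [right; left] <;> ring
  rcases hub with hd | hd <;> rw [hd] <;> constructor <;>
    rcases hE with hE | hE <;> nlinarith [hqr, hr, hE]

-- For N ≥ 1: the truncated 0.55-product never exceeds the truncated 0.80-product …
theorem pv_key_le (N : Nat) (hN : 1 ≤ N) :
    pvRoundMant (N * 4953959590107546) / 2 ^ 53 ≤ pvRoundMant (N * 7205759403792794) / 2 ^ 53 := by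
  obtain ⟨h1, h2⟩ := pvRoundMant_bounds (N * 4953959590107546)
  obtain ⟨h3, h4⟩ := pvRoundMant_bounds (N * 7205759403792794)
  have : pvRoundMant (N * 4953959590107546) ≤ pvRoundMant (N * 7205759403792794) := by
    nlinarith
  omega

-- … and the truncated 0.80-product never exceeds N itself.
theorem pv_key_n (N : Nat) :
    pvRoundMant (N * 7205759403792794) / 2 ^ 53 ≤ N := by
  obtain ⟨h1, h2⟩ := pvRoundMant_bounds (N * 7205759403792794)
  have : pvRoundMant (N * 7205759403792794) < (N + 1) * 2 ^ 53 := by nlinarith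
  omega

-- step-2 range: empty and cons forms
theorem pyRange2_eq_nil (a b : Int) (h : b ≤ a) : PySem.List.pyRange a b 2 = [] := by
  rw [PySem.List.pyRange_of_pos a b (by norm_num)]
  simp [not_lt.mpr h]

theorem pyRange2_cons (a b : Int) (h : a < b) :
    PySem.List.pyRange a b 2 = a :: PySem.List.pyRange (a + 2) b 2 := by
  rw [PySem.List.pyRange_of_pos a b (by norm_num),
      PySem.List.pyRange_of_pos (a + 2) b (by norm_num)]
  have hc : (if a < b then ((b - a + 2 - 1) / 2).toNat else 0)
      = (if a + 2 < b then ((b - (a + 2) + 2 - 1) / 2).toNat else 0) + 1 := by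
    split_ifs <;> omega
  rw [hc, List.range_succ_eq_map, List.map_cons, List.map_map]
  congr 1
  · norm_num
  · exact List.map_congr_left fun k _ => by simp [Nat.succ_eq_add_one]; ring

theorem pv_mod_two_eq_emod (a : Int) : PySem.Int.mod a 2 = a % 2 := by
  simp [PySem.Int.mod, Int.fmod_eq_emod]

-- filtering the even elements out of a unit range is a step-2 range starting at the next even number
theorem pv_filter_even (k : Nat) (a b : Int) (ha : 0 ≤ a) (hk : (b - a).toNat = k) :
    (PySem.List.pyRange a b 1).filter (fun i => decide (PySem.Int.mod i 2 = 0))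
      = PySem.List.pyRange (a + PySem.Int.mod a 2) b 2 := by
  induction k using Nat.strong_induction_on generalizing a with
  | _ k ih =>
    rcases le_or_gt b a with hba | hab
    · rw [PySem.List.pyRange_one_eq_nil hba, pyRange2_eq_nil]
      · simp
      · have := pv_mod_two_eq_emod a; omega
    · rw [PySem.List.pyRange_one_cons hab, List.filter_cons]
      have hrec := ih (b - (a + 1)).toNat (by omega) (a + 1) (by omega) rfl
      rcases Int.emod_two_eq_zero_or_one a with he | ho
      · have hma : PySem.Int.mod a 2 = 0 := by rw [pv_mod_two_eq_emod]; exact he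
        have hm1 : PySem.Int.mod (a + 1) 2 = 1 := by rw [pv_mod_two_eq_emod]; omega
        rw [hm1] at hrec
        rw [hma]
        rw [if_pos (by norm_num), add_zero, pyRange2_cons a b hab]
        congr 1
        rw [hrec]
        congr 1
        ring
      · have hma : PySem.Int.mod a 2 = 1 := by rw [pv_mod_two_eq_emod]; exact ho
        have hm1 : PySem.Int.mod (a + 1) 2 = 0 := by rw [pv_mod_two_eq_emod]; omega
        rw [hm1] at hrec
        simp only [add_zero] at hrec
        rw [hma]
        rw [if_neg (by norm_num), hrec]

-- sign/anatomy of the shared float helper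
theorem pvTruncMul_nonneg (n : Int) (h : 0 ≤ n) (m : Nat) : 0 ≤ pvTruncMul n m := by
  unfold pvTruncMul
  rw [if_neg (by omega)]
  positivity

theorem pvTruncMul_zero (m : Nat) : pvTruncMul 0 m = 0 := by
  norm_num [pvTruncMul, pvRoundMant]

theorem pvTruncMul_nonpos (n : Int) (h : n ≤ 0) (m : Nat) : pvTruncMul n m ≤ 0 := by
  unfold pvTruncMul
  split_ifs with h'
  · simp
    positivity
  · have h0 : n = 0 := by omega
    subst h0
    simp

-- the main list identity: A's filtered scan is B's three concatenated segments
theorem pv_lists_eq (n : Int) :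
    ((PySem.List.pyRange 0 n 1).foldl (fun acc i =>
      if pvTruncMul n 4953959590107546 ≤ i ∧ i < pvTruncMul n 7205759403792794 then acc ++ [i]
      else if PySem.Int.mod i 2 = 0 then acc ++ [i]
      else acc) [])
    = PySem.List.pyRange 0 (pvTruncMul n 4953959590107546) 2
      ++ PySem.List.pyRange (pvTruncMul n 4953959590107546) (pvTruncMul n 7205759403792794) 1
      ++ PySem.List.pyRange (pvTruncMul n 7205759403792794 + PySem.Int.mod (pvTruncMul n 7205759403792794) 2) n 2 := by
  set rs := pvTruncMul n 4953959590107546 with hrs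
  set re := pvTruncMul n 7205759403792794 with hre
  have hfun : (fun (acc : List Int) i =>
      if rs ≤ i ∧ i < re then acc ++ [i]
      else if PySem.Int.mod i 2 = 0 then acc ++ [i]
      else acc)
      = (fun acc i =>
        if (rs ≤ i ∧ i < re) ∨ PySem.Int.mod i 2 = 0 then acc ++ [i] else acc) := by
    funext acc i
    split_ifs <;> tauto
  rw [hfun, PySem.List.foldl_append_ite_eq_filter, List.nil_append]
  rcases le_or_gt n 0 with hn | hn
  · -- empty on both sides
    have hrs0 : rs ≤ 0 := pvTruncMul_nonpos n hn _
    have hre0 : re ≤ rs := by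
      rcases eq_or_lt_of_le hn with h0 | hneg
      · rw [show rs = pvTruncMul n 4953959590107546 from hrs, show re = pvTruncMul n 7205759403792794 from hre, h0, pvTruncMul_zero, pvTruncMul_zero]
      · have hN : 1 ≤ n.natAbs := by omega
        have := pv_key_le n.natAbs hN
        simp only [hrs, hre, pvTruncMul, if_pos hneg]
        omega
    have hren : n ≤ re := by
      rcases eq_or_lt_of_le hn with h0 | hneg
      · rw [show re = pvTruncMul n 7205759403792794 from hre, h0, pvTruncMul_zero]
      · have := pv_key_n n.natAbs
        simp only [hre, pvTruncMul, if_pos hneg]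
        omega
    have hmod : 0 ≤ PySem.Int.mod re 2 := by rw [pv_mod_two_eq_emod]; omega
    rw [PySem.List.pyRange_one_eq_nil hn, pyRange2_eq_nil 0 rs hrs0,
        PySem.List.pyRange_one_eq_nil hre0, pyRange2_eq_nil _ n (by omega)]
    simp
  · -- n ≥ 1: split the index range at rs and re
    have hN : 1 ≤ n.natAbs := by omega
    have h0rs : 0 ≤ rs := pvTruncMul_nonneg n (by omega) _
    have hrsre : rs ≤ re := by
      have := pv_key_le n.natAbs hN
      simp only [hrs, hre, pvTruncMul, if_neg (by omega : ¬ n < 0)]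
      omega
    have hren : re ≤ n := by
      have := pv_key_n n.natAbs
      simp only [hre, pvTruncMul, if_neg (by omega : ¬ n < 0)]
      omega
    rw [PySem.List.pyRange_one_append 0 rs n h0rs (by omega),
        PySem.List.pyRange_one_append rs re n hrsre hren,
        List.filter_append, List.filter_append, List.append_assoc]
    congr 1
    · -- head: below rs only the parity test matters
      rw [List.filter_congr (q := fun i => decide (PySem.Int.mod i 2 = 0))
          (fun x hx => by
            rw [PySem.List.mem_pyRange_one] at hx
            simp only [decide_eq_decide]
            constructor
            · rintro (⟨h1, _⟩ | h2)
              · omega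
              · exact h2
            · exact fun h => Or.inr h)]
      have h := pv_filter_even (rs - 0).toNat 0 rs (le_refl 0) rfl
      rw [h]
      norm_num [pv_mod_two_eq_emod]
    congr 1
    · -- window: everything is kept
      apply List.filter_eq_self.mpr
      intro i hi
      rw [PySem.List.mem_pyRange_one] at hi
      simp only [decide_eq_true_eq]
      exact Or.inl hi
    · -- tail: at or above re only the parity test matters
      rw [List.filter_congr (q := fun i => decide (PySem.Int.mod i 2 = 0))
          (fun x hx => by
            rw [PySem.List.mem_pyRange_one] at hx
            simp only [decide_eq_decide]
            constructor
            · rintro (⟨_, h1⟩ | h2)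
              · omega
              · exact h2
            · exact fun h => Or.inr h)]
      exact pv_filter_even (n - re).toNat re n (by omega) rfl

-- ===== VERDICT (by name: the statement is the Claim_ definition above) =====
theorem build_variable_indices_spec : Claim_equal_build_variable_indices := by
  intro n _
  have h := pv_lists_eq n
  show build_variable_indices n = build_variable_indices_alt n
  simp only [build_variable_indices, build_variable_indices_alt, Prod.mk.injEq]
  exact ⟨by rw [h], h⟩
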